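-- pv_equiv track=rewrite | github.com/daviddjklm5/clawcheck | automation/reporting/low_score_feedback.py | _build_org_meta_map
-- ===== SOURCE A (Python) =====
-- from typing import Any
--
-- def _build_org_meta_map(org_scope_rows: list[dict[str, Any]]) -> dict[str, dict[str, Any]]:
--     org_meta_by_code: dict[str, dict[str, Any]] = {}
--     for row in org_scope_rows:
--         org_code = _text(row.get("org_code"))
--         if not org_code:
--             continue
--         current = org_meta_by_code.setdefault(
--             org_code,
--             {
--                 "org_code": org_code,
--                 "organization_name": _text(row.get("organization_name")),
--                 "org_unit_name": _text(row.get("org_unit_name")),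
--                 "physical_level": _text(row.get("physical_level")),
--             },
--         )
--         if not current["organization_name"] and _text(row.get("organization_name")):
--             current["organization_name"] = _text(row.get("organization_name"))
--         if not current["org_unit_name"] and _text(row.get("org_unit_name")):
--             current["org_unit_name"] = _text(row.get("org_unit_name"))
--         if not current["physical_level"] and _text(row.get("physical_level")):
--             current["physical_level"] = _text(row.get("physical_level"))
--     return org_meta_by_code
--
-- def _text(value: Any) -> str:
--     if value is None:
--         return ""
--     text = str(value).strip()
--     return text
-- ===== SOURCE B (Python) =====
-- from typing import Any
--
--
-- def _text(value: Any) -> str: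
--     if value is None:
--         return ""
--     return str(value).strip()
--
--
-- def _first_text(rows: list[dict[str, Any]], key: str) -> str:
--     for row in rows:
--         text = _text(row.get(key))
--         if text:
--             return text
--     return ""
--
--
-- def _build_org_meta_map(org_scope_rows: list[dict[str, Any]]) -> dict[str, dict[str, Any]]:
--     # Pass 1: group rows by org_code, preserving first-seen order of codes.
--     rows_by_code: dict[str, list[dict[str, Any]]] = {}
--     for row in org_scope_rows:
--         org_code = _text(row.get("org_code"))
--         if org_code:
--             rows_by_code.setdefault(org_code, []).append(row)
--     # Pass 2: each field is the first non-empty value across the code's rows.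
--     return {
--         org_code: {
--             "org_code": org_code,
--             "organization_name": _first_text(rows, "organization_name"),
--             "org_unit_name": _first_text(rows, "org_unit_name"),
--             "physical_level": _first_text(rows, "physical_level"),
--         }
--         for org_code, rows in rows_by_code.items()
--     }
-- ===== Notes on version B (the rewrite author's own statement) =====
-- stated objective: alternative
-- what changed: A's single streaming loop that mutates per-code metadata dicts in place is replaced by a group-by phase (org_code -> its rows, first-seen order) followed by a per-code reduction taking the first non-empty value of each field.
import Mathlib
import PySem

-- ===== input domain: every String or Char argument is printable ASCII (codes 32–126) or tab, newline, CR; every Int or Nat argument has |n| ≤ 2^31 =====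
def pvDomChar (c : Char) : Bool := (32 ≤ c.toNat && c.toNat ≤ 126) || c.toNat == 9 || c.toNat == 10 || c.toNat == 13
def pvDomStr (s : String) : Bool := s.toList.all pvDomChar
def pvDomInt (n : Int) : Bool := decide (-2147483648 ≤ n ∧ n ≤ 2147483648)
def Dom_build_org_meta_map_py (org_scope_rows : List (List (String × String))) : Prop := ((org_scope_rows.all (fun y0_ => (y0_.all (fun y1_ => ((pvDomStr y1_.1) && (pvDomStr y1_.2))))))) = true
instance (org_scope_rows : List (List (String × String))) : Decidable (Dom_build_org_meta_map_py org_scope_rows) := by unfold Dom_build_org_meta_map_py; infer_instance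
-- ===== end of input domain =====

-- B replaces A's single streaming fill-loop by a group-by pass plus a per-code
-- first-non-empty reduction (objective: alternative decomposition, same cost).
-- Dicts are modelled as assoc lists per the type convention: lookup = first match,
-- setdefault appends, in-place mutation = position-preserving map — exact for Python dicts.

-- ===== PORT A =====
-- _text(row.get(k))
def pvText (o : Option String) : String :=
  match o with
  | none => ""
  | some s => PySem.Str.strip s

-- row.get(k)
def pvRowGet (row : List (String × String)) (k : String) : Option String :=
  (row.find? (fun p => p.1 == k)).map (·.2)

-- current[k]  (key always present in A's metadata dicts)
def pvAGet (m : List (String × String)) (k : String) : String :=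
  ((m.find? (fun p => p.1 == k)).map (·.2)).getD ""

-- current[k] = v  (in-place overwrite, position preserved)
def pvASet (m : List (String × String)) (k v : String) : List (String × String) :=
  m.map (fun p => if p.1 == k then (p.1, v) else p)

-- "if not current[k] and t: current[k] = t"
def pvFieldUpd (cur : List (String × String)) (k t : String) : List (String × String) :=
  if pvAGet cur k = "" ∧ t ≠ "" then pvASet cur k t else cur

-- one iteration of A's loop
def pvStepA (d : List (String × List (String × String))) (row : List (String × String)) :
    List (String × List (String × String)) :=
  let code := pvText (pvRowGet row "org_code")
  if code = "" then d
  else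
    let init : List (String × String) :=
      [("org_code", code),
       ("organization_name", pvText (pvRowGet row "organization_name")),
       ("org_unit_name", pvText (pvRowGet row "org_unit_name")),
       ("physical_level", pvText (pvRowGet row "physical_level"))]
    -- setdefault: keep if present, else append
    let d1 := if d.any (fun p => p.1 == code) then d else d ++ [(code, init)]
    let cur := ((d1.find? (fun p => p.1 == code)).map (·.2)).getD init
    let cur := pvFieldUpd cur "organization_name" (pvText (pvRowGet row "organization_name"))
    let cur := pvFieldUpd cur "org_unit_name" (pvText (pvRowGet row "org_unit_name"))
    let cur := pvFieldUpd cur "physical_level" (pvText (pvRowGet row "physical_level"))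
    -- mutating `current` in place = replacing the value stored at code
    d1.map (fun p => if p.1 == code then (p.1, cur) else p)

def build_org_meta_map_py (org_scope_rows : List (List (String × String))) :
    List (String × List (String × String)) :=
  org_scope_rows.foldl pvStepA []

-- ===== PORT B =====
-- pass 1: rows_by_code.setdefault(code, []).append(row)
def pvGroupStep (g : List (String × List (List (String × String)))) (row : List (String × String)) :
    List (String × List (List (String × String))) :=
  let code := pvText (pvRowGet row "org_code")
  if code = "" then g
  else if g.any (fun p => p.1 == code) then
    g.map (fun p => if p.1 == code then (p.1, p.2 ++ [row]) else p)
  else g ++ [(code, [row])]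

-- _first_text(rows, key)
def pvFirstText : List (List (String × String)) → String → String
  | [], _ => ""
  | r :: t, k =>
    let s := pvText (pvRowGet r k)
    if s = "" then pvFirstText t k else s

-- the per-code metadata dict of pass 2
def pvMetaOf (code : String) (rs : List (List (String × String))) : List (String × String) :=
  [("org_code", code),
   ("organization_name", pvFirstText rs "organization_name"),
   ("org_unit_name", pvFirstText rs "org_unit_name"),
   ("physical_level", pvFirstText rs "physical_level")]

def build_org_meta_map_py_alt (org_scope_rows : List (List (String × String))) :
    List (String × List (String × String)) :=
  (org_scope_rows.foldl pvGroupStep []).map (fun p => (p.1, pvMetaOf p.1 p.2))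

-- ===== PRECONDITION & SPEC =====
def Spec_build_org_meta_map_py (org_scope_rows : List (List (String × String))) (out : List (String × List (String × String))) : Prop := out = build_org_meta_map_py_alt org_scope_rows
instance (org_scope_rows : List (List (String × String))) (out : List (String × List (String × String))) : Decidable (Spec_build_org_meta_map_py org_scope_rows out) := by unfold Spec_build_org_meta_map_py; infer_instance

-- ===== CLAIM (what is proved, stated in full; the proofs are below) =====
def Claim_equal_build_org_meta_map_py : Prop := ∀ (org_scope_rows : List (List (String × String))), Dom_build_org_meta_map_py org_scope_rows → Spec_build_org_meta_map_py org_scope_rows (build_org_meta_map_py org_scope_rows)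

-- ===== LEMMAS AND PROOFS =====

def pvRed (p : String × List (List (String × String))) : String × List (String × String) :=
  (p.1, pvMetaOf p.1 p.2)

theorem pvFirstText_append (rs : List (List (String × String))) (r : List (String × String)) (k : String) :
    pvFirstText (rs ++ [r]) k =
      if pvFirstText rs k = "" then pvText (pvRowGet r k) else pvFirstText rs k := by
  induction rs with
  | nil => simp [pvFirstText]
  | cons h t ih =>
      simp only [List.cons_append, pvFirstText]
      by_cases hs : pvText (pvRowGet h k) = "" <;> simp [hs, ih]

-- the three conditional in-place updates turn pvMetaOf rs into pvMetaOf (rs ++ [row])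
theorem pvUpd_meta (c : String) (rs : List (List (String × String))) (row : List (String × String)) :
    pvFieldUpd (pvFieldUpd (pvFieldUpd (pvMetaOf c rs)
        "organization_name" (pvText (pvRowGet row "organization_name")))
        "org_unit_name" (pvText (pvRowGet row "org_unit_name")))
        "physical_level" (pvText (pvRowGet row "physical_level"))
      = pvMetaOf c (rs ++ [row]) := by
  simp only [pvMetaOf, pvFieldUpd, pvAGet, pvASet, pvFirstText_append, List.find?, List.map]
  by_cases h1 : pvFirstText rs "organization_name" = "" <;>
    by_cases h2 : pvFirstText rs "org_unit_name" = "" <;>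
      by_cases h3 : pvFirstText rs "physical_level" = "" <;>
        by_cases t1 : pvText (pvRowGet row "organization_name") = "" <;>
          by_cases t2 : pvText (pvRowGet row "org_unit_name") = "" <;>
            by_cases t3 : pvText (pvRowGet row "physical_level") = "" <;>
              simp_all

theorem pvMetaOf_single (c : String) (row : List (String × String)) :
    pvMetaOf c [row] =
      [("org_code", c),
       ("organization_name", pvText (pvRowGet row "organization_name")),
       ("org_unit_name", pvText (pvRowGet row "org_unit_name")),
       ("physical_level", pvText (pvRowGet row "physical_level"))] := by
  simp only [pvMetaOf, pvFirstText]
  by_cases t1 : pvText (pvRowGet row "organization_name") = "" <;>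
    by_cases t2 : pvText (pvRowGet row "org_unit_name") = "" <;>
      by_cases t3 : pvText (pvRowGet row "physical_level") = "" <;>
        simp_all

theorem pvMap_noKey {β : Type} (c : String) (v : β) (g : List (String × β))
    (h : g.any (fun p => p.1 == c) = false) :
    g.map (fun p => if p.1 == c then (p.1, v) else p) = g := by
  induction g with
  | nil => rfl
  | cons p t ih =>
      simp only [List.any_cons, Bool.or_eq_false_iff] at h
      simp only [List.map_cons, h.1, Bool.false_eq_true, if_false, ih h.2]

theorem pvMap_noKey2 {β : Type} (c : String) (f : String × β → β) (g : List (String × β))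
    (h : g.any (fun p => p.1 == c) = false) :
    g.map (fun p => if p.1 == c then (p.1, f p) else p) = g := by
  induction g with
  | nil => rfl
  | cons p t ih =>
      simp only [List.any_cons, Bool.or_eq_false_iff] at h
      simp only [List.map_cons, h.1, Bool.false_eq_true, if_false, ih h.2]

theorem pvAny_red (c : String) (t : List (String × List (List (String × String)))) :
    ((t.map pvRed).any fun q => q.1 == c) = (t.any fun q => q.1 == c) := by
  simp [List.any_map, Function.comp_def, pvRed]

theorem pvStepA_cons (h0 : String × List (String × String))
    (d : List (String × List (String × String))) (row : List (String × String))
    (hp : (h0.1 == pvText (pvRowGet row "org_code")) = false) :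
    pvStepA (h0 :: d) row = h0 :: pvStepA d row := by
  unfold pvStepA
  by_cases hc : pvText (pvRowGet row "org_code") = ""
  · simp [hc]
  · by_cases ha : (d.any fun p => p.1 == pvText (pvRowGet row "org_code")) = true <;>
      simp [hc, ha, hp, List.find?_cons_of_neg] <;>
      (intro he; exact absurd he (by simpa using hp))

theorem pvGroupStep_cons (h0 : String × List (List (String × String)))
    (t : List (String × List (List (String × String)))) (row : List (String × String))
    (hp : (h0.1 == pvText (pvRowGet row "org_code")) = false) :
    pvGroupStep (h0 :: t) row = h0 :: pvGroupStep t row := by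
  unfold pvGroupStep
  by_cases hc : pvText (pvRowGet row "org_code") = ""
  · simp [hc]
  · by_cases ha : (t.any fun p => p.1 == pvText (pvRowGet row "org_code")) = true <;>
      simp [hc, ha, hp] <;>
      (intro he; exact absurd he (by simpa using hp))

theorem pvStep_eq (row : List (String × String)) :
    ∀ g : List (String × List (List (String × String))),
      (g.map Prod.fst).Nodup →
      pvStepA (g.map pvRed) row = (pvGroupStep g row).map pvRed := by
  intro g
  induction g with
  | nil =>
      intro _
      by_cases hc : pvText (pvRowGet row "org_code") = ""
      · simp [pvStepA, pvGroupStep, hc]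
      · simp only [pvStepA, pvGroupStep, hc, if_false]
        simp [pvRed, pvMetaOf_single, pvFieldUpd, pvAGet, List.find?]
  | cons p t ih =>
      intro hnd
      have hndt : (t.map Prod.fst).Nodup := (List.nodup_cons.mp (by simpa using hnd)).2
      by_cases hc : pvText (pvRowGet row "org_code") = ""
      · simp [pvStepA, pvGroupStep, hc]
      · by_cases hp : (p.1 == pvText (pvRowGet row "org_code")) = true
        · -- head entry holds this org_code
          have hpe : p.1 = pvText (pvRowGet row "org_code") := by simpa using hp
          have hnotin : p.1 ∉ t.map Prod.fst := (List.nodup_cons.mp (by simpa using hnd)).1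
          have hAnyT : (t.any fun q => q.1 == pvText (pvRowGet row "org_code")) = false := by
            simp only [List.any_eq_false]
            intro q hq hbe
            apply hnotin
            rw [hpe, ← show q.1 = pvText (pvRowGet row "org_code") from by simpa using hbe]
            exact List.mem_map_of_mem hq
          have hAnyRT : ((t.map pvRed).any fun q => q.1 == pvText (pvRowGet row "org_code")) = false :=
            (pvAny_red (pvText (pvRowGet row "org_code")) t).trans hAnyT
          simp only [pvStepA, pvGroupStep, hc, if_false, List.map_cons, List.any_cons, pvRed,
            hp, Bool.true_or, if_true, List.find?, Option.map_some, Option.getD_some]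
          rw [pvMap_noKey _ _ _ (by simpa [pvRed] using hAnyRT),
              pvMap_noKey2 _ _ _ hAnyT]
          rw [pvUpd_meta]
        · -- head entry is a different org_code: push the head through both steps
          have hp' : (p.1 == pvText (pvRowGet row "org_code")) = false := by
            simpa using hp
          rw [List.map_cons, pvStepA_cons _ _ _ (by simpa [pvRed] using hp'),
              ih hndt, pvGroupStep_cons _ _ _ hp', List.map_cons]

theorem pvGroupStep_nodup (row : List (String × String))
    (g : List (String × List (List (String × String))))
    (h : (g.map Prod.fst).Nodup) :
    ((pvGroupStep g row).map Prod.fst).Nodup := by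
  unfold pvGroupStep
  by_cases hc : pvText (pvRowGet row "org_code") = ""
  · simpa [hc]
  · simp only [hc, if_false]
    by_cases ha : (g.any fun p => p.1 == pvText (pvRowGet row "org_code")) = true
    · simp only [ha, if_true, List.map_map]
      have : (Prod.fst ∘ fun p : String × List (List (String × String)) =>
          if (p.1 == pvText (pvRowGet row "org_code")) = true then (p.1, p.2 ++ [row]) else p)
          = Prod.fst := by
        funext q
        show (if (q.1 == pvText (pvRowGet row "org_code")) = true then (q.1, q.2 ++ [row]) else q).1 = q.1
        split <;> rfl
      rw [this]; exact h
    · have ha' : ∀ q ∈ g, ¬ (q.1 == pvText (pvRowGet row "org_code")) = true := by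
        intro q hq hbe
        exact ha (List.any_eq_true.mpr ⟨q, hq, hbe⟩)
      simp only [ha, Bool.false_eq_true, if_false, List.map_append, List.map_cons, List.map_nil]
      rw [List.nodup_append]
      refine ⟨h, List.nodup_singleton _, ?_⟩
      intro a hag b hb hab
      rw [List.mem_singleton] at hb
      obtain ⟨q, hq, hq1⟩ := List.mem_map.mp hag
      exact ha' q hq (by simp [hq1, hab, hb])

theorem pvFoldl_eq (rows : List (List (String × String))) :
    ∀ g : List (String × List (List (String × String))),
      (g.map Prod.fst).Nodup →
      rows.foldl pvStepA (g.map pvRed) = (rows.foldl pvGroupStep g).map pvRed := by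
  induction rows with
  | nil => intro g _; rfl
  | cons r t ih =>
      intro g hnd
      simp only [List.foldl_cons]
      rw [pvStep_eq r g hnd]
      exact ih _ (pvGroupStep_nodup r g hnd)

-- ===== VERDICT (by name: the statement is the Claim_ definition above) =====
theorem build_org_meta_map_py_spec : Claim_equal_build_org_meta_map_py := by
  intro rows _
  show build_org_meta_map_py rows = build_org_meta_map_py_alt rows
  have := pvFoldl_eq rows [] (by simp)
  simpa [build_org_meta_map_py, build_org_meta_map_py_alt] using this
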